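-- pv_equiv track=rewrite | github.com/ontodev/gadget | gadget/extract.py | get_top_ancestors
-- ===== SOURCE A (Python) =====
-- def get_top_ancestors(
--     hierarchy: dict,
--     term_id: str,
--     top_ancestors: set = None,
--     top_terms: list = None,
-- ) -> set:
--     """Get a set of top-level ancestors (either in top terms or ancestors with no asserted parents).
--
--     :param hierarchy: dict containing child -> list of parents
--     :param term_id: term to retrieve top ancestors for
--     :param top_ancestors: set to collect top ancestors in
--     :param top_terms: set of terms to consider as top ancestors
--     :return set of top ancestors"""
--     if not top_ancestors:
--         top_ancestors = set()
--
--     parents = hierarchy.get(term_id)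
--     if not parents:
--         top_ancestors.add(term_id)
--     else:
--         for p in parents:
--             if p == "owl:Thing":
--                 top_ancestors.add(term_id)
--             elif p in top_terms:
--                 top_ancestors.add(p)
--             else:
--                 top_ancestors.update(
--                     get_top_ancestors(hierarchy, p, top_ancestors=top_ancestors, top_terms=top_terms)
--                 )
--     return top_ancestors
-- ===== SOURCE B (Python) =====
-- def get_top_ancestors(
--     hierarchy: dict,
--     term_id: str,
--     top_ancestors: set = None,
--     top_terms: list = None,
-- ) -> set:
--     """Iterative depth-first traversal with an explicit frame stack and a
--     seen-set memo: each term is expanded at most once, instead of A's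
--     recursive re-expansion of every shared ancestor along every path."""
--     result = top_ancestors if top_ancestors else set()
--     terms = top_terms if top_terms is not None else []
--
--     def frame(t):
--         parents = hierarchy.get(t)
--         return [t, list(parents)] if parents else [t, None]
--
--     seen = {term_id}
--     stack = [frame(term_id)]
--     while stack:
--         t, pending = stack[-1]
--         if pending is None:          # no asserted parents: t itself is a top ancestor
--             result.add(t)
--             stack.pop()
--         elif not pending:            # all parents of t handled
--             stack.pop()
--         else:
--             p = pending.pop(0)
--             if p == "owl:Thing":
--                 result.add(t)
--             elif p in terms:
--                 result.add(p)
--             elif p not in seen: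
--                 seen.add(p)
--                 stack.append(frame(p))
--     return result
-- ===== Notes on version B (the rewrite author's own statement) =====
-- stated objective: alternative
-- what changed: Replaces A's naive recursion, which re-expands a shared ancestor once per path to it, by an iterative depth-first traversal using an explicit stack of (node, pending parents) frames with a seen-set memo, expanding every node at most once (not measurably faster on the generated input family).
import Mathlib
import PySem

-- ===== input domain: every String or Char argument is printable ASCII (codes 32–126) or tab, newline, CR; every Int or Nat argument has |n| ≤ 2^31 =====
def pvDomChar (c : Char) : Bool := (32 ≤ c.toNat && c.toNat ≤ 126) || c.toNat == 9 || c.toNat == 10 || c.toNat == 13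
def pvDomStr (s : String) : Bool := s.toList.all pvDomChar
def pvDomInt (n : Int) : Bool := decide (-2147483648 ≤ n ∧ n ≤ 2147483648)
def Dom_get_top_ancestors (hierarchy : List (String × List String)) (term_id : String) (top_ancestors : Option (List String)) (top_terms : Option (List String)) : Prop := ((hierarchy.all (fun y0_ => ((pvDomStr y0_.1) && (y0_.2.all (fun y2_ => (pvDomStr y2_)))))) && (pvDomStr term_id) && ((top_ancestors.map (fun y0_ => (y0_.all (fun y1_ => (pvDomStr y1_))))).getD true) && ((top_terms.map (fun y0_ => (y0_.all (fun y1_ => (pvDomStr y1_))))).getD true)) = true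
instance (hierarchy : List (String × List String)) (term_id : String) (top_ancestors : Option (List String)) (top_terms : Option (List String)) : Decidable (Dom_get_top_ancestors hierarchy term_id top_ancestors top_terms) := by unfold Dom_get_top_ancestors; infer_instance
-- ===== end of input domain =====

-- B replaces A's naive recursion (which re-expands a shared ancestor once per path to it)
-- by an iterative depth-first traversal: an explicit stack of (node, pending parents)
-- frames plus a seen-set memo, so every node is expanded at most once.
-- Both A and B mutate a passed-in non-empty `top_ancestors` set in place (same side effect);
-- the theorems below are about the returned set.

-- ===== PORT A =====
-- Fuel (hierarchy.length + 1) only makes the recursion total in Lean: under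
-- Pre_ (the parent traversal is well-founded) the fuel is never exhausted.
-- `top_terms.getD []`: when top_terms is None, Python A raises TypeError as soon as
-- `p in top_terms` is evaluated; Pre_ excludes exactly those inputs.
def goA (h : List (String × List String)) (tts : List String) : Nat → String → PySem.Set String → PySem.Set String
  | 0, _, s => s
  | f+1, t, s =>
    match List.lookup t h with
    | none => s.add t
    | some ps =>
      if ps.isEmpty then s.add t
      else ps.foldl (fun s p =>
        if p == "owl:Thing" then s.add t
        else if tts.contains p then s.add p
        else goA h tts f p s) s

def get_top_ancestors (hierarchy : List (String × List String)) (term_id : String) (top_ancestors : Option (List String)) (top_terms : Option (List String)) : List String :=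
  -- `if not top_ancestors: top_ancestors = set()` — None and the empty set both give []
  goA hierarchy (top_terms.getD []) (hierarchy.length + 1) term_id (PySem.Set.ofList (top_ancestors.getD []))

-- ===== PORT B =====
-- frame(t): the node together with its not-yet-processed parent list (None = no parents)
def frameB (h : List (String × List String)) (t : String) : String × Option (List String) :=
  match List.lookup t h with
  | none => (t, none)
  | some ps => if ps.isEmpty then (t, none) else (t, some ps)

-- The while loop over the frame stack.  The fuel is a totality device only: it is
-- consumed solely when an unseen node is pushed, and under Pre_ it is never exhausted
-- (the proofs below show the number of pushes is at most the number of parent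
-- occurrences in `h`, which is below the fuel the wrapper passes).
def runB (h : List (String × List String)) (tts : List String) :
    Nat → List (String × Option (List String)) → PySem.Set String → PySem.Set String → PySem.Set String
  | _, [], _, s => s
  | fuel, (t, none) :: rest, vis, s => runB h tts fuel rest vis (PySem.Set.add s t)
  | fuel, (_, some []) :: rest, vis, s => runB h tts fuel rest vis s
  | fuel, (t, some (p :: pend)) :: rest, vis, s =>
    if p == "owl:Thing" then runB h tts fuel ((t, some pend) :: rest) vis (PySem.Set.add s t)
    else if tts.contains p then runB h tts fuel ((t, some pend) :: rest) vis (PySem.Set.add s p)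
    else if PySem.Set.contains vis p then runB h tts fuel ((t, some pend) :: rest) vis s
    else
      match fuel with
      | 0 => s
      | fuel' + 1 => runB h tts fuel' (frameB h p :: (t, some pend) :: rest) (PySem.Set.add vis p) s
termination_by fuel stack _ _ => (fuel, (stack.map (fun fr => 1 + (fr.2.getD []).length)).sum)
decreasing_by
  all_goals simp only [List.map_cons, List.sum_cons, Option.getD_some, Option.getD_none, List.length_nil, List.length_cons]
  · apply Prod.Lex.right; omega
  · apply Prod.Lex.right; omega
  · apply Prod.Lex.right; omega
  · apply Prod.Lex.right; omega
  · apply Prod.Lex.right; omega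
  · apply Prod.Lex.left; omega

def get_top_ancestors_alt (hierarchy : List (String × List String)) (term_id : String) (top_ancestors : Option (List String)) (top_terms : Option (List String)) : List String :=
  -- seen = {term_id}; stack = [frame(term_id)]; result starts from the given set ([] when falsy)
  runB hierarchy (top_terms.getD []) ((hierarchy.flatMap (fun e => e.2)).length + 2)
    [frameB hierarchy term_id] (PySem.Set.ofList [term_id])
    (PySem.Set.ofList (top_ancestors.getD []))

-- ===== PRECONDITION & SPEC =====
-- pvGood h tts k t: the parent traversal from t (stopping at missing/empty parent lists,
-- "owl:Thing" and members of tts) is well-founded with depth ≤ k, i.e. A's recursion from t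
-- terminates within depth k.  A terminating traversal never exceeds depth hierarchy.length.
def pvGood (h : List (String × List String)) (tts : List String) : Nat → String → Bool
  | 0, t =>
    match List.lookup t h with
    | none => true
    | some ps => ps.all (fun p => p == "owl:Thing" || tts.contains p)
  | k+1, t =>
    match List.lookup t h with
    | none => true
    | some ps => ps.all (fun p => p == "owl:Thing" || tts.contains p || pvGood h tts k p)

-- every asserted parent of t is "owl:Thing" (vacuously true when t has no parent entry)
def pvAllOwl (h : List (String × List String)) (t : String) : Bool :=
  match List.lookup t h with
  | none => true
  | some ps => ps.all (fun p => p == "owl:Thing")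

-- Pre_ excludes exactly the inputs on which Python A raises: a parent cycle reachable from
-- term_id (RecursionError) and top_terms=None when a membership test `p in top_terms` is
-- reached, i.e. some parent of term_id differs from "owl:Thing" (TypeError).
-- (pvGood is slightly stronger than needed when a cycle is cut off by top_terms/owl:Thing
-- parents listed before the looping parent — A also raises there, processing parents in order,
-- so nothing A returns on is excluded.)
def Pre_get_top_ancestors (hierarchy : List (String × List String)) (term_id : String) (top_ancestors : Option (List String)) (top_terms : Option (List String)) : Prop :=
  pvGood hierarchy (top_terms.getD []) hierarchy.length term_id = true ∧
  (top_terms = none → pvAllOwl hierarchy term_id = true)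

instance (hierarchy : List (String × List String)) (term_id : String) (top_ancestors : Option (List String)) (top_terms : Option (List String)) : Decidable (Pre_get_top_ancestors hierarchy term_id top_ancestors top_terms) := by
  unfold Pre_get_top_ancestors; infer_instance

def pvWitness_get_top_ancestors : (List (String × List String)) × String × Option (List String) × Option (List String) :=
  ([("b", ["a", "owl:Thing"]), ("a", [])], "b", none, some ["z"])

def Spec_get_top_ancestors (hierarchy : List (String × List String)) (term_id : String) (top_ancestors : Option (List String)) (top_terms : Option (List String)) (out : List String) : Prop := out = get_top_ancestors_alt hierarchy term_id top_ancestors top_terms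
instance (hierarchy : List (String × List String)) (term_id : String) (top_ancestors : Option (List String)) (top_terms : Option (List String)) (out : List String) : Decidable (Spec_get_top_ancestors hierarchy term_id top_ancestors top_terms out) := by unfold Spec_get_top_ancestors; infer_instance

-- ===== CLAIM (what is proved, stated in full; the proofs are below) =====
def Claim_equal_get_top_ancestors : Prop := ∀ (hierarchy : List (String × List String)) (term_id : String) (top_ancestors : Option (List String)) (top_terms : Option (List String)), Dom_get_top_ancestors hierarchy term_id top_ancestors top_terms → Pre_get_top_ancestors hierarchy term_id top_ancestors top_terms → Spec_get_top_ancestors hierarchy term_id top_ancestors top_terms (get_top_ancestors hierarchy term_id top_ancestors top_terms)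

-- ===== LEMMAS AND PROOFS =====

theorem mem_of_lookup_eq_some {t : String} {ps : List String} {h : List (String × List String)}
    (hm : List.lookup t h = some ps) : (t, ps) ∈ h := by
  induction h with
  | nil => simp [List.lookup] at hm
  | cons a l ih =>
    rw [List.lookup_cons] at hm
    by_cases he : t == a.1
    · simp [he] at hm
      have ht : t = a.1 := eq_of_beq he
      subst ht
      rw [← hm]
      exact List.mem_cons_self
    · simp [he] at hm; right; exact ih hm

theorem nodup_subset_length_le {l l' : List String} (hn : l.Nodup) (hs : l ⊆ l') :
    l.length ≤ l'.length := by
  calc l.length = l.toFinset.card := (List.toFinset_card_of_nodup hn).symm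
  _ ≤ l'.toFinset.card := Finset.card_le_card (fun x hx => by
      simp only [List.mem_toFinset] at *; exact hs hx)
  _ ≤ l'.length := l'.toFinset_card_le

-- the sequence of elements A's call goA f t adds to the accumulating set (independent of the set)
def rawA (h : List (String × List String)) (tts : List String) : Nat → String → List String
  | 0, _ => []
  | f+1, t =>
    match List.lookup t h with
    | none => [t]
    | some ps =>
      if ps.isEmpty then [t]
      else ps.flatMap (fun p =>
        if p == "owl:Thing" then [t]
        else if tts.contains p then [p]
        else rawA h tts f p)

-- v is "done": A's expansion of v can add nothing that is not already in s
def pvDone (h : List (String × List String)) (tts : List String) (v : String) (s : List String) : Prop :=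
  ∃ kv, pvGood h tts kv v = true ∧ ∀ x ∈ rawA h tts (kv+1) v, x ∈ s

lemma foldl_add_of_subset (l : List String) (s : PySem.Set String) (hs : ∀ x ∈ l, x ∈ s) :
    List.foldl PySem.Set.add s l = s := by
  induction l generalizing s with
  | nil => rfl
  | cons a l ih =>
    rw [List.foldl_cons, PySem.Set.add_of_mem (hs a List.mem_cons_self)]
    exact ih s (fun x hx => hs x (List.mem_cons_of_mem a hx))

lemma mem_foldl_add_left (l : List String) (s : PySem.Set String) (x : String) (hx : x ∈ s) :
    x ∈ List.foldl PySem.Set.add s l := by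
  induction l generalizing s with
  | nil => exact hx
  | cons a l ih =>
    rw [List.foldl_cons]
    exact ih (s.add a) ((PySem.Set.mem_add s a x).mpr (Or.inl hx))

lemma mem_foldl_add_right (l : List String) (s : PySem.Set String) (x : String) (hx : x ∈ l) :
    x ∈ List.foldl PySem.Set.add s l := by
  induction l generalizing s with
  | nil => cases hx
  | cons a l ih =>
    rw [List.foldl_cons]
    rcases List.mem_cons.mp hx with rfl | hx
    · exact mem_foldl_add_left l (s.add x) x ((PySem.Set.mem_add s x x).mpr (Or.inr rfl))
    · exact ih (s.add a) hx

lemma goA_eq_foldl (h : List (String × List String)) (tts : List String) :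
    ∀ (f : Nat) (t : String) (s : PySem.Set String),
      goA h tts f t s = List.foldl PySem.Set.add s (rawA h tts f t) := by
  intro f
  induction f with
  | zero => intro t s; rfl
  | succ f IH =>
    intro t s
    have aux : ∀ (qs : List String) (s : PySem.Set String),
        qs.foldl (fun s p => if p == "owl:Thing" then s.add t else if tts.contains p then s.add p else goA h tts f p s) s
          = List.foldl PySem.Set.add s (qs.flatMap (fun p => if p == "owl:Thing" then [t] else if tts.contains p then [p] else rawA h tts f p)) := by
      intro qs
      induction qs with
      | nil => intro s; rfl
      | cons p qs ih =>
        intro s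
        simp only [List.foldl_cons, List.flatMap_cons, List.foldl_append]
        by_cases hb : (p == "owl:Thing") = true
        · simp only [hb, if_true, List.foldl_cons, List.foldl_nil]
          exact ih (s.add t)
        · simp only [Bool.not_eq_true] at hb
          by_cases hc : tts.contains p = true
          · simp only [hb, hc, Bool.false_eq_true, if_false, if_true, List.foldl_cons, List.foldl_nil]
            exact ih (s.add p)
          · simp only [Bool.not_eq_true] at hc
            simp only [hb, hc, Bool.false_eq_true, if_false]
            rw [IH p s]
            exact ih _
    simp only [goA, rawA]
    cases hg : List.lookup t h with
    | none => simp
    | some ps =>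
      by_cases hps : ps.isEmpty
      · simp [hps]
      · simp only [Bool.not_eq_true] at hps
        simp only [hps, Bool.false_eq_true, if_false]
        exact aux ps s

lemma good_step (h : List (String × List String)) (tts : List String)
    (m : Nat) (t p : String) (ps : List String)
    (hm : pvGood h tts m t = true) (hg : List.lookup t h = some ps) (hp : p ∈ ps)
    (hb1 : (p == "owl:Thing") = false) (hb2 : tts.contains p = false) :
    ∃ m' < m, pvGood h tts m' p = true := by
  cases m with
  | zero =>
    exfalso
    unfold pvGood at hm
    rw [hg] at hm
    have hall := List.all_eq_true.mp hm p hp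
    rcases Bool.or_eq_true_iff.mp hall with h1 | h2
    · exact absurd h1 (by simpa using hb1)
    · exact absurd h2 (by simpa using hb2)
  | succ m =>
    refine ⟨m, Nat.lt_succ_self m, ?_⟩
    unfold pvGood at hm
    rw [hg] at hm
    have hall := List.all_eq_true.mp hm p hp
    rcases Bool.or_eq_true_iff.mp hall with h12 | h3
    · rcases Bool.or_eq_true_iff.mp h12 with h1 | h2
      · exact absurd h1 (by simpa using hb1)
      · exact absurd h2 (by simpa using hb2)
    · exact h3

lemma good_no_descent (h : List (String × List String)) (tts : List String) :
    ∀ (k : Nat) (t : String), pvGood h tts k t = true →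
      (∀ m, pvGood h tts m t = true → ∃ m' < m, pvGood h tts m' t = true) → False := by
  intro k
  induction k using Nat.strong_induction_on with
  | _ k IHk =>
    intro t hk H
    obtain ⟨m', hm', hg'⟩ := H k hk
    exact IHk m' hm' t hg' H

lemma rawA_fuel (h : List (String × List String)) (tts : List String) :
    ∀ (k : Nat) (t : String) (f f' : Nat), pvGood h tts k t = true → k < f → k < f' →
      rawA h tts f t = rawA h tts f' t := by
  intro k
  induction k with
  | zero =>
    intro t f f' hk hf hf'
    obtain ⟨f, rfl⟩ : ∃ g, f = g + 1 := ⟨f - 1, by omega⟩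
    obtain ⟨f', rfl⟩ : ∃ g, f' = g + 1 := ⟨f' - 1, by omega⟩
    simp only [rawA]
    cases hg : List.lookup t h with
    | none => rfl
    | some ps =>
      by_cases hps : ps.isEmpty
      · simp [hps]
      · simp only [Bool.not_eq_true] at hps
        simp only [hps, Bool.false_eq_true, if_false]
        unfold pvGood at hk
        rw [hg] at hk
        apply List.flatMap_congr
        intro p hp
        have hall := List.all_eq_true.mp hk p hp
        rcases Bool.or_eq_true_iff.mp hall with h1 | h2
        · simp [h1]
        · by_cases hb : (p == "owl:Thing") = true
          · simp [hb]
          · have hc2 : p ∈ tts := by simpa using h2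
            simp [hb, hc2]
  | succ k IHk =>
    intro t f f' hk hf hf'
    obtain ⟨f, rfl⟩ : ∃ g, f = g + 1 := ⟨f - 1, by omega⟩
    obtain ⟨f', rfl⟩ : ∃ g, f' = g + 1 := ⟨f' - 1, by omega⟩
    simp only [rawA]
    cases hg : List.lookup t h with
    | none => rfl
    | some ps =>
      by_cases hps : ps.isEmpty
      · simp [hps]
      · simp only [Bool.not_eq_true] at hps
        simp only [hps, Bool.false_eq_true, if_false]
        unfold pvGood at hk
        rw [hg] at hk
        apply List.flatMap_congr
        intro p hp
        have hall := List.all_eq_true.mp hk p hp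
        by_cases hb : (p == "owl:Thing") = true
        · simp [hb]
        · by_cases hc : tts.contains p = true
          · have hc2 : p ∈ tts := by simpa using hc
            simp [hb, hc2]
          · have h3 : pvGood h tts k p = true := by
              rcases Bool.or_eq_true_iff.mp hall with h12 | h3
              · rcases Bool.or_eq_true_iff.mp h12 with h1 | h2
                · exact absurd h1 hb
                · exact absurd h2 hc
              · exact h3
            have hc2 : p ∉ tts := by simpa using hc
            have hIH := IHk p f f' h3 (by omega) (by omega)
            simp [hb, hc2, hIH]

-- one-step equations of the while loop (proof-side views of runB)
lemma runB_nil (h : List (String × List String)) (tts : List String) (fuel : Nat)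
    (vis s : PySem.Set String) : runB h tts fuel [] vis s = s := by
  simp [runB]

lemma runB_frame_none (h : List (String × List String)) (tts : List String) (fuel : Nat)
    (t : String) (rest : List (String × Option (List String))) (vis s : PySem.Set String) :
    runB h tts fuel ((t, none) :: rest) vis s = runB h tts fuel rest vis (PySem.Set.add s t) := by
  simp [runB]

lemma runB_frame_done (h : List (String × List String)) (tts : List String) (fuel : Nat)
    (t : String) (rest : List (String × Option (List String))) (vis s : PySem.Set String) :
    runB h tts fuel ((t, some []) :: rest) vis s = runB h tts fuel rest vis s := by
  simp [runB]

lemma runB_owl (h : List (String × List String)) (tts : List String) (fuel : Nat)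
    (t p : String) (pend : List String) (rest : List (String × Option (List String)))
    (vis s : PySem.Set String) (hb : (p == "owl:Thing") = true) :
    runB h tts fuel ((t, some (p :: pend)) :: rest) vis s
      = runB h tts fuel ((t, some pend) :: rest) vis (PySem.Set.add s t) := by
  cases fuel <;> simp [runB, hb]

lemma runB_topterm (h : List (String × List String)) (tts : List String) (fuel : Nat)
    (t p : String) (pend : List String) (rest : List (String × Option (List String)))
    (vis s : PySem.Set String) (hb : (p == "owl:Thing") = false) (hc : tts.contains p = true) :
    runB h tts fuel ((t, some (p :: pend)) :: rest) vis s
      = runB h tts fuel ((t, some pend) :: rest) vis (PySem.Set.add s p) := by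
  have hc' : p ∈ tts := by simpa using hc
  cases fuel <;> simp [runB, hb, hc']

lemma runB_visited (h : List (String × List String)) (tts : List String) (fuel : Nat)
    (t p : String) (pend : List String) (rest : List (String × Option (List String)))
    (vis s : PySem.Set String) (hb : (p == "owl:Thing") = false) (hc : tts.contains p = false)
    (hv : PySem.Set.contains vis p = true) :
    runB h tts fuel ((t, some (p :: pend)) :: rest) vis s
      = runB h tts fuel ((t, some pend) :: rest) vis s := by
  have hc' : p ∉ tts := by simpa using hc
  have hv' : p ∈ vis := (PySem.Set.contains_iff vis p).mp hv
  cases fuel <;> simp [runB, hb, hc', hv']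

lemma runB_push (h : List (String × List String)) (tts : List String) (fuel : Nat)
    (t p : String) (pend : List String) (rest : List (String × Option (List String)))
    (vis s : PySem.Set String) (hb : (p == "owl:Thing") = false) (hc : tts.contains p = false)
    (hv : PySem.Set.contains vis p = false) :
    runB h tts (fuel + 1) ((t, some (p :: pend)) :: rest) vis s
      = runB h tts fuel (frameB h p :: (t, some pend) :: rest) (PySem.Set.add vis p) s := by
  have hc' : p ∉ tts := by simpa using hc
  have hv' : p ∉ vis := by
    intro hm
    rw [(PySem.Set.contains_iff vis p).mpr hm] at hv
    cases hv
  simp [runB, hb, hc', hv']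

-- The simulation invariant: running the machine from a freshly pushed frame for t
-- (t already marked seen by the pusher) equals A's expansion goA of t, the seen set
-- grows only by parents occurring in h (one fuel unit per growth), and every seen
-- node is either still on the recursion path (G) or fully accounted for (pvDone).
lemma pv_machine (h : List (String × List String)) (tts : List String) :
    ∀ (k : Nat) (t : String) (fa : Nat) (vis s : PySem.Set String) (G : List String)
      (rest : List (String × Option (List String))),
      pvGood h tts k t = true → k < fa →
      (∀ g ∈ G, ∀ m, pvGood h tts m g = true → ∃ m' < m, pvGood h tts m' t = true) →
      (∀ v ∈ vis, v ∈ t :: G ∨ pvDone h tts v s) →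
      ∃ (c : Nat) (vis' : PySem.Set String),
        (∀ f, runB h tts (f + c) (frameB h t :: rest) vis s
              = runB h tts f rest vis' (goA h tts fa t s)) ∧
        c + vis.length = vis'.length ∧
        (∀ v ∈ vis', v ∈ G ∨ pvDone h tts v (goA h tts fa t s)) ∧
        (∀ v ∈ vis, v ∈ vis') ∧
        (∀ x ∈ vis', x ∈ vis ∨ x ∈ h.flatMap (fun e => e.2)) ∧
        (vis.Nodup → vis'.Nodup) ∧
        (∀ x ∈ s, x ∈ goA h tts fa t s) := by
  intro k
  induction k using Nat.strong_induction_on with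
  | _ k IH =>
    intro t fa vis s G rest hgood hfa HG HD
    obtain ⟨fA, rfl⟩ : ∃ g, fa = g + 1 := ⟨fa - 1, by omega⟩
    cases hg : List.lookup t h with
    | none =>
      have hframe : frameB h t = (t, none) := by simp [frameB, hg]
      have hA : goA h tts (fA + 1) t s = PySem.Set.add s t := by simp [goA, hg]
      refine ⟨0, vis, ?_, by omega, ?_, fun v hv => hv, fun x hx => Or.inl hx, fun hn => hn, ?_⟩
      · intro f
        rw [hframe, runB_frame_none, hA, Nat.add_zero]
      · intro v hv
        rcases HD v hv with htG | hdone
        · rcases List.mem_cons.mp htG with rfl | hGm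
          · right
            refine ⟨0, by simp [pvGood, hg], ?_⟩
            intro x hx
            simp only [rawA, hg, List.mem_singleton] at hx
            subst hx
            rw [hA]; exact (PySem.Set.mem_add _ _ _).mpr (Or.inr rfl)
          · left; exact hGm
        · right
          obtain ⟨kv, hkv, hsub⟩ := hdone
          exact ⟨kv, hkv, fun x hx => by rw [hA]; exact (PySem.Set.mem_add _ _ _).mpr (Or.inl (hsub x hx))⟩
      · intro x hx; rw [hA]; exact (PySem.Set.mem_add _ _ _).mpr (Or.inl hx)
    | some ps =>
      by_cases hps : ps.isEmpty = true
      · have hpse : ps = [] := List.isEmpty_iff.mp hps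
        subst hpse
        have hframe : frameB h t = (t, none) := by simp [frameB, hg]
        have hA : goA h tts (fA + 1) t s = PySem.Set.add s t := by simp [goA, hg]
        refine ⟨0, vis, ?_, by omega, ?_, fun v hv => hv, fun x hx => Or.inl hx, fun hn => hn, ?_⟩
        · intro f
          rw [hframe, runB_frame_none, hA, Nat.add_zero]
        · intro v hv
          rcases HD v hv with htG | hdone
          · rcases List.mem_cons.mp htG with rfl | hGm
            · right
              refine ⟨0, by simp [pvGood, hg], ?_⟩
              intro x hx
              simp only [rawA, hg, List.isEmpty_nil, if_true, List.mem_singleton] at hx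
              subst hx
              rw [hA]; exact (PySem.Set.mem_add _ _ _).mpr (Or.inr rfl)
            · left; exact hGm
          · right
            obtain ⟨kv, hkv, hsub⟩ := hdone
            exact ⟨kv, hkv, fun x hx => by rw [hA]; exact (PySem.Set.mem_add _ _ _).mpr (Or.inl (hsub x hx))⟩
        · intro x hx; rw [hA]; exact (PySem.Set.mem_add _ _ _).mpr (Or.inl hx)
      · -- the real frame: iterate over the parent list ps
        simp only [Bool.not_eq_true] at hps
        have hframe : frameB h t = (t, some ps) := by simp [frameB, hg, hps]
        have hA : goA h tts (fA + 1) t s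
            = ps.foldl (fun s p => if p == "owl:Thing" then PySem.Set.add s t else if tts.contains p then PySem.Set.add s p else goA h tts fA p s) s := by
          simp only [goA, hg, hps, Bool.false_eq_true, if_false]
        have hpar : ∀ p ∈ ps, ((p == "owl:Thing") || tts.contains p) = true ∨ ∃ kp, kp < k ∧ pvGood h tts kp p = true := by
          intro p hp
          cases k with
          | zero =>
            unfold pvGood at hgood; rw [hg] at hgood
            exact Or.inl (List.all_eq_true.mp hgood p hp)
          | succ k' =>
            unfold pvGood at hgood; rw [hg] at hgood
            have hall := List.all_eq_true.mp hgood p hp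
            rcases Bool.or_eq_true_iff.mp hall with h12 | h3
            · exact Or.inl h12
            · exact Or.inr ⟨k', Nat.lt_succ_self k', h3⟩
        have hdesc : ∀ p ∈ ps, (p == "owl:Thing") = false → tts.contains p = false →
            ∀ g ∈ t :: G, ∀ m, pvGood h tts m g = true → ∃ m' < m, pvGood h tts m' p = true := by
          intro p hp hb hc g hgm m hm
          rcases List.mem_cons.mp hgm with rfl | hgG
          · exact good_step h tts m g p ps hm hg hp hb hc
          · obtain ⟨m', hm', hmt⟩ := HG g hgG m hm
            obtain ⟨m'', hm'', hmp⟩ := good_step h tts m' t p ps hmt hg hp hb hc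
            exact ⟨m'', by omega, hmp⟩
        have hskip : ∀ p ∈ ps, (p == "owl:Thing") = false → tts.contains p = false →
            ∀ (s0 : PySem.Set String), (p ∈ t :: G ∨ pvDone h tts p s0) → goA h tts fA p s0 = s0 := by
          intro p hp hb hc s0 hcase
          obtain ⟨kp, hkp, hgp⟩ := (hpar p hp).resolve_left (by
            intro hor
            rcases Bool.or_eq_true_iff.mp hor with h1 | h2
            · rw [hb] at h1; cases h1
            · rw [hc] at h2; cases h2)
          rcases hcase with hmem | ⟨kv, hkv, hsub⟩
          · exact (good_no_descent h tts kp p hgp (fun m hm => hdesc p hp hb hc p hmem m hm)).elim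
          · have h1 : rawA h tts fA p = rawA h tts (max kp kv + 1) p :=
              rawA_fuel h tts kp p fA _ hgp (by omega) (by omega)
            have h2 : rawA h tts (kv + 1) p = rawA h tts (max kp kv + 1) p :=
              rawA_fuel h tts kv p _ _ hkv (by omega) (by omega)
            rw [goA_eq_foldl, h1, ← h2]
            exact foldl_add_of_subset _ _ hsub
        have hps_univ : ∀ p ∈ ps, p ∈ h.flatMap (fun e => e.2) :=
          fun p hp => List.mem_flatMap.mpr ⟨(t, ps), mem_of_lookup_eq_some hg, hp⟩
        -- the while loop consuming the pending parents of the top frame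
        have aux : ∀ (pend : List String), (∀ p ∈ pend, p ∈ ps) →
            ∀ (vis0 s0 : PySem.Set String),
            (∀ v ∈ vis0, v ∈ t :: G ∨ pvDone h tts v s0) →
            ∃ (c : Nat) (vis1 : PySem.Set String),
              (∀ f, runB h tts (f + c) ((t, some pend) :: rest) vis0 s0
                    = runB h tts f rest vis1 (pend.foldl (fun s p => if p == "owl:Thing" then PySem.Set.add s t else if tts.contains p then PySem.Set.add s p else goA h tts fA p s) s0)) ∧
              c + vis0.length = vis1.length ∧
              (∀ v ∈ vis1, v ∈ t :: G ∨ pvDone h tts v (pend.foldl (fun s p => if p == "owl:Thing" then PySem.Set.add s t else if tts.contains p then PySem.Set.add s p else goA h tts fA p s) s0)) ∧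
              (∀ v ∈ vis0, v ∈ vis1) ∧
              (∀ x ∈ vis1, x ∈ vis0 ∨ x ∈ h.flatMap (fun e => e.2)) ∧
              (vis0.Nodup → vis1.Nodup) ∧
              (∀ x ∈ s0, x ∈ pend.foldl (fun s p => if p == "owl:Thing" then PySem.Set.add s t else if tts.contains p then PySem.Set.add s p else goA h tts fA p s) s0) ∧
              (∀ x ∈ pend.flatMap (fun p => if p == "owl:Thing" then [t] else if tts.contains p then [p] else rawA h tts fA p),
                x ∈ pend.foldl (fun s p => if p == "owl:Thing" then PySem.Set.add s t else if tts.contains p then PySem.Set.add s p else goA h tts fA p s) s0) := by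
          intro pend
          induction pend with
          | nil =>
            intro _ vis0 s0 HD0
            refine ⟨0, vis0, ?_, by omega, ?_, fun v hv => hv, fun x hx => Or.inl hx, fun hn => hn, fun x hx => hx, by simp⟩
            · intro f
              rw [Nat.add_zero, runB_frame_done, List.foldl_nil]
            · intro v hv; exact HD0 v hv
          | cons p pend ihp =>
            intro hsub vis0 s0 HD0
            have hpps : p ∈ ps := hsub p List.mem_cons_self
            have hsub' : ∀ q ∈ pend, q ∈ ps := fun q hq => hsub q (List.mem_cons_of_mem p hq)
            by_cases hb : (p == "owl:Thing") = true
            · -- result.add(t)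
              have HD0' : ∀ v ∈ vis0, v ∈ t :: G ∨ pvDone h tts v (PySem.Set.add s0 t) := by
                intro v hv0
                rcases HD0 v hv0 with htG | ⟨kv, hkv, hsb⟩
                · exact Or.inl htG
                · exact Or.inr ⟨kv, hkv, fun x hx => (PySem.Set.mem_add s0 t x).mpr (Or.inl (hsb x hx))⟩
              obtain ⟨c, vis1, e_run, e_len, i1, i2, i3, i4, i5, i6⟩ := ihp hsub' vis0 (PySem.Set.add s0 t) HD0'
              refine ⟨c, vis1, ?_, e_len, ?_, i2, i3, i4, ?_, ?_⟩
              · intro f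
                rw [runB_owl h tts (f + c) t p pend rest vis0 s0 hb, e_run f]
                simp only [List.foldl_cons, hb, if_true]
              · intro v hv1
                simp only [List.foldl_cons, hb, if_true]
                exact i1 v hv1
              · intro x hx
                simp only [List.foldl_cons, hb, if_true]
                exact i5 x ((PySem.Set.mem_add s0 t x).mpr (Or.inl hx))
              · intro x hx
                simp only [List.flatMap_cons, hb, if_true, List.mem_append, List.mem_singleton] at hx
                simp only [List.foldl_cons, hb, if_true]
                rcases hx with rfl | hx
                · exact i5 x ((PySem.Set.mem_add s0 x x).mpr (Or.inr rfl))
                · exact i6 x hx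
            · have hb' : (p == "owl:Thing") = false := by simpa using hb
              by_cases hc : tts.contains p = true
              · -- result.add(p): p is a top term
                have HD0' : ∀ v ∈ vis0, v ∈ t :: G ∨ pvDone h tts v (PySem.Set.add s0 p) := by
                  intro v hv0
                  rcases HD0 v hv0 with htG | ⟨kv, hkv, hsb⟩
                  · exact Or.inl htG
                  · exact Or.inr ⟨kv, hkv, fun x hx => (PySem.Set.mem_add s0 p x).mpr (Or.inl (hsb x hx))⟩
                obtain ⟨c, vis1, e_run, e_len, i1, i2, i3, i4, i5, i6⟩ := ihp hsub' vis0 (PySem.Set.add s0 p) HD0'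
                refine ⟨c, vis1, ?_, e_len, ?_, i2, i3, i4, ?_, ?_⟩
                · intro f
                  rw [runB_topterm h tts (f + c) t p pend rest vis0 s0 hb' hc, e_run f]
                  simp only [List.foldl_cons, hb', hc, Bool.false_eq_true, if_false, if_true]
                · intro v hv1
                  simp only [List.foldl_cons, hb', hc, Bool.false_eq_true, if_false, if_true]
                  exact i1 v hv1
                · intro x hx
                  simp only [List.foldl_cons, hb', hc, Bool.false_eq_true, if_false, if_true]
                  exact i5 x ((PySem.Set.mem_add s0 p x).mpr (Or.inl hx))
                · intro x hx
                  simp only [List.flatMap_cons, hb', hc, Bool.false_eq_true, if_false, if_true,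
                    List.mem_append, List.mem_singleton] at hx
                  simp only [List.foldl_cons, hb', hc, Bool.false_eq_true, if_false, if_true]
                  rcases hx with rfl | hx
                  · exact i5 x ((PySem.Set.mem_add s0 x x).mpr (Or.inr rfl))
                  · exact i6 x hx
              · have hc' : tts.contains p = false := by simpa using hc
                by_cases hv : PySem.Set.contains vis0 p = true
                · -- p already seen: the machine skips it, and A's re-expansion adds nothing
                  have hpv : p ∈ vis0 := (PySem.Set.contains_iff vis0 p).mp hv
                  have hE : goA h tts fA p s0 = s0 := hskip p hpps hb' hc' s0 (HD0 p hpv)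
                  obtain ⟨c, vis1, e_run, e_len, i1, i2, i3, i4, i5, i6⟩ := ihp hsub' vis0 s0 HD0
                  refine ⟨c, vis1, ?_, e_len, ?_, i2, i3, i4, ?_, ?_⟩
                  · intro f
                    rw [runB_visited h tts (f + c) t p pend rest vis0 s0 hb' hc' hv, e_run f]
                    simp only [List.foldl_cons, hb', hc', Bool.false_eq_true, if_false, hE]
                  · intro v hv1
                    simp only [List.foldl_cons, hb', hc', Bool.false_eq_true, if_false, hE]
                    exact i1 v hv1
                  · intro x hx
                    simp only [List.foldl_cons, hb', hc', Bool.false_eq_true, if_false, hE]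
                    exact i5 x hx
                  · intro x hx
                    simp only [List.flatMap_cons, hb', hc', Bool.false_eq_true, if_false, List.mem_append] at hx
                    simp only [List.foldl_cons, hb', hc', Bool.false_eq_true, if_false, hE]
                    rcases hx with hx | hx
                    · refine i5 x ?_
                      rw [← hE, goA_eq_foldl]
                      exact mem_foldl_add_right _ _ _ hx
                    · exact i6 x hx
                · -- p unseen: mark it and push its frame
                  have hv' : PySem.Set.contains vis0 p = false := by simpa using hv
                  have hpnv : p ∉ vis0 := fun hm => by
                    rw [(PySem.Set.contains_iff vis0 p).mpr hm] at hv'; cases hv'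
                  obtain ⟨kp, hkp, hgp⟩ := (hpar p hpps).resolve_left (by
                    intro hor
                    rcases Bool.or_eq_true_iff.mp hor with h1 | h2
                    · rw [hb'] at h1; cases h1
                    · rw [hc'] at h2; cases h2)
                  have HD0' : ∀ v ∈ PySem.Set.add vis0 p, v ∈ p :: t :: G ∨ pvDone h tts v s0 := by
                    intro v hvm
                    rcases (PySem.Set.mem_add vis0 p v).mp hvm with hvm | rfl
                    · rcases HD0 v hvm with htG | hdone
                      · exact Or.inl (List.mem_cons_of_mem _ htG)
                      · exact Or.inr hdone
                    · exact Or.inl List.mem_cons_self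
                  obtain ⟨cp, visp, ep_run, ep_len, p1, p2, p3, p4, p5⟩ :=
                    IH kp hkp p fA (PySem.Set.add vis0 p) s0 (t :: G) ((t, some pend) :: rest)
                      hgp (by omega) (hdesc p hpps hb' hc') HD0'
                  obtain ⟨cr, vis1, er_run, er_len, r1, r2, r3, r4, r5, r6⟩ :=
                    ihp hsub' visp (goA h tts fA p s0) p1
                  have hlenp : (PySem.Set.add vis0 p).length = vis0.length + 1 := by
                    rw [PySem.Set.add_of_not_mem hpnv]; simp
                  refine ⟨cp + cr + 1, vis1, ?_, by omega, ?_, ?_, ?_, ?_, ?_, ?_⟩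
                  · intro f
                    have e1 : f + (cp + cr + 1) = ((f + cr) + cp) + 1 := by omega
                    rw [e1, runB_push h tts ((f + cr) + cp) t p pend rest vis0 s0 hb' hc' hv',
                      ep_run (f + cr), er_run f]
                    simp only [List.foldl_cons, hb', hc', Bool.false_eq_true, if_false]
                  · intro v hv1
                    simp only [List.foldl_cons, hb', hc', Bool.false_eq_true, if_false]
                    exact r1 v hv1
                  · intro v hv0
                    exact r2 v (p2 v ((PySem.Set.mem_add vis0 p v).mpr (Or.inl hv0)))
                  · intro x hx1
                    rcases r3 x hx1 with hx | hx
                    · rcases p3 x hx with hx' | hx'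
                      · rcases (PySem.Set.mem_add vis0 p x).mp hx' with h0 | rfl
                        · exact Or.inl h0
                        · exact Or.inr (hps_univ x hpps)
                      · exact Or.inr hx'
                    · exact Or.inr hx
                  · intro hn
                    exact r4 (p4 (PySem.Set.nodup_add vis0 p hn))
                  · intro x hx
                    simp only [List.foldl_cons, hb', hc', Bool.false_eq_true, if_false]
                    exact r5 x (p5 x hx)
                  · intro x hx
                    simp only [List.flatMap_cons, hb', hc', Bool.false_eq_true, if_false, List.mem_append] at hx
                    simp only [List.foldl_cons, hb', hc', Bool.false_eq_true, if_false]
                    rcases hx with hx | hx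
                    · refine r5 x ?_
                      rw [goA_eq_foldl]
                      exact mem_foldl_add_right _ _ _ hx
                    · exact r6 x hx
        obtain ⟨c, vis1, e_run, e_len, i1, i2, i3, i4, i5, i6⟩ := aux ps (fun p hp => hp) vis s HD
        refine ⟨c, vis1, ?_, e_len, ?_, i2, i3, i4, ?_⟩
        · intro f
          rw [hframe, hA]
          exact e_run f
        · intro v hv1
          rcases i1 v hv1 with htG | hdone
          · rcases List.mem_cons.mp htG with rfl | hGm
            · right
              refine ⟨k, hgood, ?_⟩
              intro x hx
              have hfeq : rawA h tts (k + 1) v = rawA h tts (fA + 1) v :=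
                rawA_fuel h tts k v _ _ hgood (Nat.lt_succ_self k) hfa
              rw [hfeq] at hx
              have hru : rawA h tts (fA + 1) v
                  = ps.flatMap (fun p => if p == "owl:Thing" then [v] else if tts.contains p then [p] else rawA h tts fA p) := by
                simp only [rawA, hg, hps, Bool.false_eq_true, if_false]
              rw [hru] at hx
              rw [hA]
              exact i6 x hx
            · left; exact hGm
          · right; rw [hA]; exact hdone
        · intro x hx
          rw [hA]
          exact i5 x hx

-- ===== VERDICT (by name: the statement is the Claim_ definition above) =====
theorem get_top_ancestors_spec : Claim_equal_get_top_ancestors := by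
  intro hierarchy term_id top_ancestors top_terms _ hpre
  unfold Spec_get_top_ancestors get_top_ancestors get_top_ancestors_alt
  obtain ⟨c, vis', e_run, e_len, _, _, h_sub, h_nodup, _⟩ :=
    pv_machine hierarchy (top_terms.getD []) hierarchy.length term_id (hierarchy.length + 1)
      (PySem.Set.ofList [term_id]) (PySem.Set.ofList (top_ancestors.getD [])) [] []
      hpre.1 (Nat.lt_succ_self _)
      (by intro g hg; cases hg)
      (by
        intro v hv
        left
        have : v ∈ [term_id] := (PySem.Set.mem_ofList [term_id] v).mp hv
        simpa using this)
  have hlen1 : (PySem.Set.ofList [term_id] : List String).length = 1 := rfl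
  have hnd : (vis' : List String).Nodup := h_nodup (PySem.Set.nodup_ofList _)
  have hsubs : vis' ⊆ term_id :: hierarchy.flatMap (fun e => e.2) := by
    intro x hx
    rcases h_sub x hx with hx0 | hx1
    · have : x ∈ [term_id] := (PySem.Set.mem_ofList [term_id] x).mp hx0
      simp at this
      simp [this]
    · exact List.mem_cons_of_mem _ hx1
  have hc : c ≤ (hierarchy.flatMap (fun e => e.2)).length + 2 := by
    have hle := nodup_subset_length_le hnd hsubs
    rw [List.length_cons] at hle
    rw [hlen1] at e_len
    omega
  have hF : (hierarchy.flatMap (fun e => e.2)).length + 2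
      = ((hierarchy.flatMap (fun e => e.2)).length + 2 - c) + c := by omega
  rw [hF, e_run, runB_nil]
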